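-- pv_equiv track=rewrite | github.com/intel/RAAD | src/software/axon/packageInterface.py | __cleanFileString
-- ===== SOURCE A (Python) =====
-- def __cleanFileString(nameString=""):
--     illegalChar = [
--         '!', '@', '#', '%', '^', '&', '*', '(', ')', '=', '+',
--         '{', '}', '[', ']', '|', '\\', ';', ':', '"', '\'', ',',
--         '<', '>', '?', '/', '~', '`'
--     ]
--     cleanName = str(nameString)
--     for itemChar in illegalChar:
--         cleanName = cleanName.replace(itemChar, '')
--     return cleanName
-- ===== SOURCE B (Python) =====
-- def __cleanFileString(nameString=""):
--     illegal = frozenset('!@#%^&*()=+{}[]|\\;:"\',<>?/~`')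
--     return ''.join(c for c in str(nameString) if c not in illegal)
-- ===== Notes on version B (the rewrite author's own statement) =====
-- stated objective: idiomatic
-- what changed: B makes a single pass over the input string, keeping characters not in a frozenset of illegal characters, instead of A's 28 successive full-string replace scans.
import Mathlib
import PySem

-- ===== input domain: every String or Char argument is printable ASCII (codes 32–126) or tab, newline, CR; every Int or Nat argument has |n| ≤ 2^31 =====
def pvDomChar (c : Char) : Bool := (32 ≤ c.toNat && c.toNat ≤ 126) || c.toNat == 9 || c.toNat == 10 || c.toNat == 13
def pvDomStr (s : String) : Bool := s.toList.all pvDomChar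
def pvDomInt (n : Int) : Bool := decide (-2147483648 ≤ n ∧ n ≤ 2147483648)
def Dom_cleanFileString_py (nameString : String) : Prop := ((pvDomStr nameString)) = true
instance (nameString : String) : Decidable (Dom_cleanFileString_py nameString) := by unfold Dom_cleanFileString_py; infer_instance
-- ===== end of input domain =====

-- B replaces A's 28 successive replace passes by one single pass over the input
-- keeping characters not in a set of illegal characters (objective: idiomatic).

-- ===== PORT A =====
def illegalCharA : List String :=
  ["!", "@", "#", "%", "^", "&", "*", "(", ")", "=", "+",
   "{", "}", "[", "]", "|", "\\", ";", ":", "\"", "'", ",",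
   "<", ">", "?", "/", "~", "`"]

def cleanFileString_py (nameString : String) : String :=
  illegalCharA.foldl (fun cleanName itemChar => PySem.Str.replace cleanName itemChar "") nameString

-- ===== PORT B =====
def illegalSetB : PySem.Set Char :=
  PySem.Set.ofList ['!', '@', '#', '%', '^', '&', '*', '(', ')', '=', '+',
                    '{', '}', '[', ']', '|', '\\', ';', ':', '"', '\'', ',',
                    '<', '>', '?', '/', '~', '`']

def cleanFileString_py_alt (nameString : String) : String :=
  String.ofList (nameString.toList.filter (fun c => !(illegalSetB.contains c)))

-- ===== PRECONDITION & SPEC =====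
def Spec_cleanFileString_py (nameString : String) (out : String) : Prop := out = cleanFileString_py_alt nameString
instance (nameString : String) (out : String) : Decidable (Spec_cleanFileString_py nameString out) := by unfold Spec_cleanFileString_py; infer_instance

-- ===== CLAIM (what is proved, stated in full; the proofs are below) =====
def Claim_equal_cleanFileString_py : Prop := ∀ (nameString : String), Dom_cleanFileString_py nameString → Spec_cleanFileString_py nameString (cleanFileString_py nameString)

-- ===== LEMMAS AND PROOFS =====

-- replace with a one-character pattern and empty replacement is a filter
theorem replace_go_single (c : Char) :
    ∀ (fuel : Nat) (l acc : List Char), l.length ≤ fuel →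
      PySem.Chars.replace.go [c] [] fuel l acc = acc.reverse ++ l.filter (fun x => x != c) := by
  intro fuel
  induction fuel with
  | zero =>
    intro l acc h
    have : l = [] := List.eq_nil_of_length_eq_zero (Nat.le_zero.mp h)
    subst this
    simp [PySem.Chars.replace.go]
  | succ n ih =>
    intro l acc h
    cases l with
    | nil => simp [PySem.Chars.replace.go]
    | cons x t =>
      simp only [PySem.Chars.replace.go]
      have ht : t.length ≤ n := by simpa using h
      by_cases hx : x = c
      · subst hx
        rw [if_pos (by simp [List.isPrefixOf])]
        simp only [List.length_cons, List.length_nil, Nat.zero_add, List.drop_succ_cons,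
          List.drop_zero, List.reverse_nil, List.nil_append]
        rw [ih t acc ht]
        simp [List.filter]
      · rw [if_neg (by simp [List.isPrefixOf, Ne.symm hx])]
        rw [ih t (x :: acc) ht]
        have : (x != c) = true := by simp [bne, hx]
        simp [List.filter, this]

theorem replace_single (c : Char) (s : List Char) :
    PySem.Chars.replace s [c] [] = s.filter (fun x => x != c) := by
  rw [PySem.Chars.replace]
  simp only [List.isEmpty_cons, if_neg Bool.false_ne_true]
  exact (replace_go_single c s.length s [] (le_refl _)).trans (by simp)

theorem fold_replace_filter (cs : List Char) :
    ∀ (s : String),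
      (List.foldl (fun t c => PySem.Str.replace t (String.ofList [c]) "") s cs).toList
        = s.toList.filter (fun x => !(cs.contains x)) := by
  induction cs with
  | nil => intro s; simp
  | cons c cs ih =>
    intro s
    simp only [List.foldl_cons]
    rw [ih]
    have h1 : (PySem.Str.replace s (String.ofList [c]) "").toList
        = s.toList.filter (fun x => x != c) := by
      simpa using replace_single c s.toList
    rw [h1, List.filter_filter]
    apply List.filter_congr
    intro x _
    simp only [List.contains_cons, Bool.not_or, Bool.and_comm]
    rfl

-- ===== VERDICT (by name: the statement is the Claim_ definition above) =====
theorem cleanFileString_py_spec : Claim_equal_cleanFileString_py := by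
  intro s _
  unfold Spec_cleanFileString_py cleanFileString_py cleanFileString_py_alt
  have hmap : illegalCharA
      = (['!', '@', '#', '%', '^', '&', '*', '(', ')', '=', '+',
          '{', '}', '[', ']', '|', '\\', ';', ':', '"', '\'', ',',
          '<', '>', '?', '/', '~', '`'] : List Char).map (fun c => String.ofList [c]) := by
    decide
  rw [hmap, List.foldl_map]
  have := fold_replace_filter
    (['!', '@', '#', '%', '^', '&', '*', '(', ')', '=', '+',
      '{', '}', '[', ']', '|', '\\', ';', ':', '"', '\'', ',',
      '<', '>', '?', '/', '~', '`'] : List Char) s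
  apply String.toList_inj.mp
  rw [this]
  have hset : illegalSetB
      = ['!', '@', '#', '%', '^', '&', '*', '(', ')', '=', '+',
         '{', '}', '[', ']', '|', '\\', ';', ':', '"', '\'', ',',
         '<', '>', '?', '/', '~', '`'] := by decide
  rw [hset]
  simp
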